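-- pv_equiv track=rewrite | github.com/NAVEED261/GIAIC-HACKATON-2 | Phase-5/AI_EMPLOYS_PHZ_5/devops/minikube_agent.py | _match_tool
-- ===== SOURCE A (Python) =====
-- from typing import Dict, List, Any, Optional
--
-- def _match_tool(query: str) -> Optional[str]:
--     """Match query to best Minikube tool"""
--     query = query.lower()
--
--     if any(w in query for w in ['start minikube', 'minikube start', 'start cluster']):
--         return 'minikube_start'
--     elif any(w in query for w in ['stop minikube', 'minikube stop', 'stop cluster']):
--         return 'minikube_stop'
--     elif any(w in query for w in ['delete minikube', 'minikube delete']):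
--         return 'minikube_delete'
--     elif any(w in query for w in ['status', 'minikube status']):
--         return 'minikube_status'
--     elif any(w in query for w in ['enable addon', 'addon enable']):
--         return 'enable_addon'
--     elif any(w in query for w in ['list addon', 'addons']):
--         return 'list_addons'
--     elif any(w in query for w in ['tunnel']):
--         return 'minikube_tunnel'
--     elif any(w in query for w in ['docker env', 'docker-env']):
--         return 'docker_env'
--     elif any(w in query for w in ['ip', 'minikube ip']):
--         return 'minikube_ip'
--     elif any(w in query for w in ['dashboard']):
--         return 'minikube_dashboard'
--     elif any(w in query for w in ['service url', 'service']):
--         return 'minikube_service'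
--     elif any(w in query for w in ['ssh']):
--         return 'minikube_ssh'
--
--     return 'minikube_status'
-- ===== SOURCE B (Python) =====
-- from typing import Optional
--
-- # Flat keyword table, sorted alphabetically by keyword; each keyword carries the
-- # explicit numeric priority of its rule and the tool name.  Iteration order is
-- # irrelevant: the loop computes the matching keyword with minimal priority.
-- _KEYWORDS = [
--     ('addon enable', 4, 'enable_addon'),
--     ('addons', 5, 'list_addons'),
--     ('dashboard', 9, 'minikube_dashboard'),
--     ('delete minikube', 2, 'minikube_delete'),
--     ('docker env', 7, 'docker_env'),
--     ('docker-env', 7, 'docker_env'),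
--     ('enable addon', 4, 'enable_addon'),
--     ('ip', 8, 'minikube_ip'),
--     ('list addon', 5, 'list_addons'),
--     ('minikube delete', 2, 'minikube_delete'),
--     ('minikube ip', 8, 'minikube_ip'),
--     ('minikube start', 0, 'minikube_start'),
--     ('minikube status', 3, 'minikube_status'),
--     ('minikube stop', 1, 'minikube_stop'),
--     ('service', 10, 'minikube_service'),
--     ('service url', 10, 'minikube_service'),
--     ('ssh', 11, 'minikube_ssh'),
--     ('start cluster', 0, 'minikube_start'),
--     ('start minikube', 0, 'minikube_start'),
--     ('status', 3, 'minikube_status'),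
--     ('stop cluster', 1, 'minikube_stop'),
--     ('stop minikube', 1, 'minikube_stop'),
--     ('tunnel', 6, 'minikube_tunnel'),
-- ]
--
-- def _match_tool(query: str) -> Optional[str]:
--     """Match query to best Minikube tool: arg-min of rule priority over all matching keywords."""
--     q = query.lower()
--     best = None  # (priority, tool) with minimal priority seen so far
--     for kw, prio, tool in _KEYWORDS:
--         if kw in q and (best is None or prio < best[0]):
--             best = (prio, tool)
--     return best[1] if best is not None else 'minikube_status'
-- ===== Notes on version B (the rewrite author's own statement) =====
-- stated objective: alternative
-- what changed: Replaced the priority-ordered if/elif early-return cascade with a flat alphabetically-sorted keyword table carrying explicit numeric priorities, scanned in full with an arg-min accumulator (order-independent, no early return), with the same no-match default tool.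
import Mathlib
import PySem

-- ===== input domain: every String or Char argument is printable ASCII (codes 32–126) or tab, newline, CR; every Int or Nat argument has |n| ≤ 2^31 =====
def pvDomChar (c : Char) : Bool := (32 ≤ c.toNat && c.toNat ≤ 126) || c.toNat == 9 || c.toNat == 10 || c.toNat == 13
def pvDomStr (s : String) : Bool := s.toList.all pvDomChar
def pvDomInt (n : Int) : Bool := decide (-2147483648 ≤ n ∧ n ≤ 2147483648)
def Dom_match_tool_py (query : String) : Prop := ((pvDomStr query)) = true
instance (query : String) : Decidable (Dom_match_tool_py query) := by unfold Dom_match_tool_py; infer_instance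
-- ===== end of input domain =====

-- B replaces A's priority-ordered if/elif cascade by a full arg-min scan of an
-- alphabetically sorted flat keyword table with explicit priorities; same result, no early return.

-- ===== PORT A =====
def match_tool_py (query : String) : Option String :=
  let query := PySem.Str.lower query
  if ["start minikube", "minikube start", "start cluster"].any (fun w => PySem.Str.isIn w query) then
    some "minikube_start"
  else if ["stop minikube", "minikube stop", "stop cluster"].any (fun w => PySem.Str.isIn w query) then
    some "minikube_stop"
  else if ["delete minikube", "minikube delete"].any (fun w => PySem.Str.isIn w query) then
    some "minikube_delete"
  else if ["status", "minikube status"].any (fun w => PySem.Str.isIn w query) then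
    some "minikube_status"
  else if ["enable addon", "addon enable"].any (fun w => PySem.Str.isIn w query) then
    some "enable_addon"
  else if ["list addon", "addons"].any (fun w => PySem.Str.isIn w query) then
    some "list_addons"
  else if ["tunnel"].any (fun w => PySem.Str.isIn w query) then
    some "minikube_tunnel"
  else if ["docker env", "docker-env"].any (fun w => PySem.Str.isIn w query) then
    some "docker_env"
  else if ["ip", "minikube ip"].any (fun w => PySem.Str.isIn w query) then
    some "minikube_ip"
  else if ["dashboard"].any (fun w => PySem.Str.isIn w query) then
    some "minikube_dashboard"
  else if ["service url", "service"].any (fun w => PySem.Str.isIn w query) then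
    some "minikube_service"
  else if ["ssh"].any (fun w => PySem.Str.isIn w query) then
    some "minikube_ssh"
  else
    some "minikube_status"

-- ===== PORT B =====
-- the alphabetical flat keyword table of Source B
def pvAlphaTable : List (String × Nat × String) :=
  [ ("addon enable", 4, "enable_addon"),
    ("addons", 5, "list_addons"),
    ("dashboard", 9, "minikube_dashboard"),
    ("delete minikube", 2, "minikube_delete"),
    ("docker env", 7, "docker_env"),
    ("docker-env", 7, "docker_env"),
    ("enable addon", 4, "enable_addon"),
    ("ip", 8, "minikube_ip"),
    ("list addon", 5, "list_addons"),
    ("minikube delete", 2, "minikube_delete"),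
    ("minikube ip", 8, "minikube_ip"),
    ("minikube start", 0, "minikube_start"),
    ("minikube status", 3, "minikube_status"),
    ("minikube stop", 1, "minikube_stop"),
    ("service", 10, "minikube_service"),
    ("service url", 10, "minikube_service"),
    ("ssh", 11, "minikube_ssh"),
    ("start cluster", 0, "minikube_start"),
    ("start minikube", 0, "minikube_start"),
    ("status", 3, "minikube_status"),
    ("stop cluster", 1, "minikube_stop"),
    ("stop minikube", 1, "minikube_stop"),
    ("tunnel", 6, "minikube_tunnel") ]

-- one iteration of Source B's loop: `if kw in q and (best is None or prio < best[0]): best = (prio, tool)`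
def pvStep (q : String) (acc : Option (Nat × String)) (it : String × Nat × String) : Option (Nat × String) :=
  match acc with
  | none => if PySem.Str.isIn it.1 q then some it.2 else none
  | some b => if PySem.Str.isIn it.1 q = true ∧ it.2.1 < b.1 then some it.2 else some b

def match_tool_py_alt (query : String) : Option String :=
  let q := PySem.Str.lower query
  match pvAlphaTable.foldl (pvStep q) none with
  | some b => some b.2
  | none => some "minikube_status"

-- ===== PRECONDITION & SPEC =====
def Spec_match_tool_py (query : String) (out : Option String) : Prop := out = match_tool_py_alt query
instance (query : String) (out : Option String) : Decidable (Spec_match_tool_py query out) := by unfold Spec_match_tool_py; infer_instance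

-- ===== CLAIM =====
def Claim_equal_match_tool_py : Prop := ∀ (query : String), Dom_match_tool_py query → Spec_match_tool_py query (match_tool_py query)

-- ===== LEMMAS AND PROOFS =====

-- the same table in rule-priority order (A's order)
def pvPrioTable : List (String × Nat × String) :=
  [ ("start minikube", 0, "minikube_start"),
    ("minikube start", 0, "minikube_start"),
    ("start cluster", 0, "minikube_start"),
    ("stop minikube", 1, "minikube_stop"),
    ("minikube stop", 1, "minikube_stop"),
    ("stop cluster", 1, "minikube_stop"),
    ("delete minikube", 2, "minikube_delete"),
    ("minikube delete", 2, "minikube_delete"),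
    ("status", 3, "minikube_status"),
    ("minikube status", 3, "minikube_status"),
    ("enable addon", 4, "enable_addon"),
    ("addon enable", 4, "enable_addon"),
    ("list addon", 5, "list_addons"),
    ("addons", 5, "list_addons"),
    ("tunnel", 6, "minikube_tunnel"),
    ("docker env", 7, "docker_env"),
    ("docker-env", 7, "docker_env"),
    ("ip", 8, "minikube_ip"),
    ("minikube ip", 8, "minikube_ip"),
    ("dashboard", 9, "minikube_dashboard"),
    ("service url", 10, "minikube_service"),
    ("service", 10, "minikube_service"),
    ("ssh", 11, "minikube_ssh") ]

-- first-match over a flat table (proxy: equals the arg-min fold when priorities are nondecreasing)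
def pvFirstFlat (q : String) : List (String × Nat × String) → Option (Nat × String)
  | [] => none
  | it :: rest => if PySem.Str.isIn it.1 q then some it.2 else pvFirstFlat q rest

theorem pvStep_comm (q : String) (x y : String × Nat × String)
    (h : x.2.1 = y.2.1 → x.2 = y.2) (acc : Option (Nat × String)) :
    pvStep q (pvStep q acc x) y = pvStep q (pvStep q acc y) x := by
  rcases x with ⟨kx, px, tx⟩
  rcases y with ⟨ky, py, ty⟩
  simp only at h
  simp only [pvStep]
  generalize PySem.Str.isIn kx q = bx
  generalize PySem.Str.isIn ky q = c
  cases bx <;> cases c <;> cases acc <;>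
      simp only [Bool.false_eq_true, false_and, true_and, if_true, if_false] <;>
      split_ifs <;> (try dsimp only) <;> (try split_ifs) <;>
      first
        | rfl
        | omega
        | (exact congrArg some (h (by omega)))

-- fold over a permutation is unchanged when the step commutes on the list's elements
theorem pv_foldl_perm {α β : Type} (f : β → α → β) {l₁ l₂ : List α} (p : l₁.Perm l₂)
    (comm : ∀ x ∈ l₁, ∀ y ∈ l₁, ∀ b, f (f b x) y = f (f b y) x) :
    ∀ b, l₁.foldl f b = l₂.foldl f b := by
  induction p with
  | nil => intro b; rfl
  | cons a p ih =>
      intro b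
      simp only [List.foldl_cons]
      exact ih (fun x hx y hy b => comm x (by simp [hx]) y (by simp [hy]) b) (f b a)
  | swap a a' l =>
      intro b
      simp only [List.foldl_cons]
      rw [comm a' (by simp) a (by simp)]
  | trans p₁ p₂ ih₁ ih₂ =>
      intro b
      rw [ih₁ comm b]
      exact ih₂ (fun x hx y hy b => comm x (p₁.mem_iff.mpr hx) y (p₁.mem_iff.mpr hy) b) b

theorem pv_fold_alpha_eq_prio (q : String) :
    pvAlphaTable.foldl (pvStep q) none = pvPrioTable.foldl (pvStep q) none := by
  have htie : ∀ x ∈ pvAlphaTable, ∀ y ∈ pvAlphaTable, (x.2.1 = y.2.1 → x.2 = y.2) := by decide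
  refine pv_foldl_perm (pvStep q) (by decide) ?_ none
  intro x hx y hy acc
  exact pvStep_comm q x y (htie x hx y hy) acc

theorem pv_fold_keep (q : String) (p : Nat × String) (L : List (String × Nat × String))
    (h : ∀ x ∈ L, ¬ x.2.1 < p.1) : L.foldl (pvStep q) (some p) = some p := by
  induction L with
  | nil => rfl
  | cons x r ih =>
      have hx := h x (by simp)
      simp only [List.foldl_cons, pvStep]
      rw [if_neg (by tauto)]
      exact ih (fun y hy => h y (by simp [hy]))

theorem pv_fold_eq_first (q : String) (L : List (String × Nat × String))
    (h : L.Pairwise (fun a b => a.2.1 ≤ b.2.1)) :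
    L.foldl (pvStep q) none = pvFirstFlat q L := by
  induction L with
  | nil => rfl
  | cons x r ih =>
      rcases List.pairwise_cons.mp h with ⟨h1, h2⟩
      simp only [List.foldl_cons, pvFirstFlat, pvStep]
      by_cases hx : PySem.Str.isIn x.1 q = true
      · rw [if_pos hx, if_pos hx]
        exact pv_fold_keep q x.2 r (fun y hy => by have := h1 y hy; omega)
      · rw [if_neg hx, if_neg hx]
        exact ih h2

-- collapse two adjacent equal-valued branches of a first-match chain
theorem pv_collapse2 {α : Type} (a b : Bool) (x r : α) :
    (if a then x else if b then x else r) = if (a || b) then x else r := by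
  cases a <;> cases b <;> rfl

def pvFinish (o : Option (Nat × String)) : Option String :=
  match o with
  | some b => some b.2
  | none => some "minikube_status"

-- ===== VERDICT =====
theorem match_tool_py_spec : Claim_equal_match_tool_py := by
  intro query _
  unfold Spec_match_tool_py match_tool_py match_tool_py_alt
  show _ = pvFinish (pvAlphaTable.foldl (pvStep (PySem.Str.lower query)) none)
  rw [pv_fold_alpha_eq_prio, pv_fold_eq_first _ _ (by decide)]
  simp only [pvFirstFlat, pvPrioTable, pv_collapse2]
  simp only [apply_ite pvFinish]
  simp only [pvFinish]
  simp only [List.any_cons, List.any_nil, Bool.or_false]
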